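-- pv_equiv track=rewrite | github.com/Abde1rahman-Osheba/Graduation_PATHS | backend/app/services/job_scraper/scraper_adapter.py | _categorize_links
-- ===== SOURCE A (Python) =====
-- from typing import Any, Iterable
--
-- def _categorize_links(links: Iterable[str]) -> tuple[str | None, str | None]:
--     """Pick a likely jobs-platform URL and a careers URL from raw links."""
--     jobs_url: str | None = None
--     careers_url: str | None = None
--     platform_hosts = (
--         "lever.co",
--         "greenhouse.io",
--         "zohorecruit.com",
--         "smartrecruiters.com",
--         "workday.com",
--         "bamboohr.com",
--         "jobvite.com",
--         "icims.com",
--         "teamtailor.com",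
--         "personio.com",
--     )
--     career_keywords = (
--         "careers",
--         "jobs",
--         "employment",
--         "opportunities",
--         "hiring",
--         "openings",
--         "join-us",
--         "work-with-us",
--     )
--     excluded = (
--         "glassdoor.com",
--         "indeed.com",
--         "monster.com",
--         "ziprecruiter.com",
--     )
--     for link in links:
--         ll = link.lower()
--         if not jobs_url and any(host in ll for host in platform_hosts):
--             jobs_url = link
--             continue
--         if (
--             not careers_url
--             and any(k in ll for k in career_keywords)
--             and not any(host in ll for host in excluded)
--             and not any(host in ll for host in platform_hosts)
--         ):
--             careers_url = link
--     return jobs_url, careers_url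
-- ===== SOURCE B (Python) =====
-- def _categorize_links(links):
--     """Pick a likely jobs-platform URL and a careers URL from raw links."""
--     platform_hosts = (
--         "lever.co", "greenhouse.io", "zohorecruit.com", "smartrecruiters.com",
--         "workday.com", "bamboohr.com", "jobvite.com", "icims.com",
--         "teamtailor.com", "personio.com",
--     )
--     career_keywords = (
--         "careers", "jobs", "employment", "opportunities", "hiring",
--         "openings", "join-us", "work-with-us",
--     )
--     excluded = (
--         "glassdoor.com", "indeed.com", "monster.com", "ziprecruiter.com",
--     )
--     links = list(links)
--     jobs_url = next(
--         (l for l in links if any(h in l.lower() for h in platform_hosts)), None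
--     )
--     careers_url = next(
--         (
--             l
--             for l in links
--             if (ll := l.lower())
--             and any(k in ll for k in career_keywords)
--             and not any(h in ll for h in excluded)
--             and not any(h in ll for h in platform_hosts)
--         ),
--         None,
--     )
--     return jobs_url, careers_url
-- ===== Notes on version B (the rewrite author's own statement) =====
-- stated objective: simpler
-- what changed: Replaces A's single stateful loop with two mutable result variables and a continue by two independent first-match scans (next over a generator) over the materialized list, one per result.
import Mathlib
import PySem

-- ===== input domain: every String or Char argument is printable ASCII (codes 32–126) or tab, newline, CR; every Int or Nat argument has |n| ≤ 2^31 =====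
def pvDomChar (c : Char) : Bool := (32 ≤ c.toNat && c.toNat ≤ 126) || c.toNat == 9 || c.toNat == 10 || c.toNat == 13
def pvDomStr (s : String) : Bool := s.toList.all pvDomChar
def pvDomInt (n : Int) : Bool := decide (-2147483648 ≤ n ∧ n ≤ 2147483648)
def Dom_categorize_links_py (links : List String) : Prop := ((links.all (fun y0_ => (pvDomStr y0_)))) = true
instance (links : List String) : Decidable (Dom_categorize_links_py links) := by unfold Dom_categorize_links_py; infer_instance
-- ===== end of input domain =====

-- B replaces A's single stateful loop (two mutable results, a continue) with two
-- independent first-match scans over the list, one per result (objective: simpler).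

-- shared constant tuples (identical literals in both Pythons)
def pv_platform_hosts : List String :=
  ["lever.co", "greenhouse.io", "zohorecruit.com", "smartrecruiters.com",
   "workday.com", "bamboohr.com", "jobvite.com", "icims.com",
   "teamtailor.com", "personio.com"]
def pv_career_keywords : List String :=
  ["careers", "jobs", "employment", "opportunities", "hiring",
   "openings", "join-us", "work-with-us"]
def pv_excluded : List String :=
  ["glassdoor.com", "indeed.com", "monster.com", "ziprecruiter.com"]

-- ===== PORT A =====
-- Python truthiness of an Optional[str]: None and "" are falsy
def pyFalsy : Option String → Bool
  | none => true
  | some s => s == ""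

def categorizeLoopA : List String → Option String → Option String → Option String × Option String
  | [], jobs_url, careers_url => (jobs_url, careers_url)
  | link :: rest, jobs_url, careers_url =>
    let ll := PySem.Str.lower link
    if pyFalsy jobs_url && pv_platform_hosts.any (fun host => PySem.Str.isIn host ll) then
      categorizeLoopA rest (some link) careers_url
    else if pyFalsy careers_url
        && pv_career_keywords.any (fun k => PySem.Str.isIn k ll)
        && !(pv_excluded.any (fun host => PySem.Str.isIn host ll))
        && !(pv_platform_hosts.any (fun host => PySem.Str.isIn host ll)) then
      categorizeLoopA rest jobs_url (some link)
    else
      categorizeLoopA rest jobs_url careers_url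

def categorize_links_py (links : List String) : Option String × Option String :=
  categorizeLoopA links none none

-- ===== PORT B =====
def pvPlatMatch (l : String) : Bool :=
  pv_platform_hosts.any (fun h => PySem.Str.isIn h (PySem.Str.lower l))

def pvCareerMatch (l : String) : Bool :=
  let ll := PySem.Str.lower l
  !(ll == "") && pv_career_keywords.any (fun k => PySem.Str.isIn k ll)
    && !(pv_excluded.any (fun h => PySem.Str.isIn h ll))
    && !(pv_platform_hosts.any (fun h => PySem.Str.isIn h ll))

def categorize_links_py_alt (links : List String) : Option String × Option String :=
  (links.find? pvPlatMatch, links.find? pvCareerMatch)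

-- ===== PRECONDITION & SPEC =====
def Spec_categorize_links_py (links : List String) (out : Option String × Option String) : Prop := out = categorize_links_py_alt links
instance (links : List String) (out : Option String × Option String) : Decidable (Spec_categorize_links_py links out) := by unfold Spec_categorize_links_py; infer_instance

-- ===== CLAIM (what is proved, stated in full; the proofs are below) =====
def Claim_equal_categorize_links_py : Prop := ∀ (links : List String), Dom_categorize_links_py links → Spec_categorize_links_py links (categorize_links_py links)

-- ===== LEMMAS AND PROOFS =====

-- no career keyword occurs in the empty string
theorem any_career_empty (s : String) (h : s = "") :
    pv_career_keywords.any (fun k => PySem.Str.isIn k s) = false := by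
  subst h; decide

-- A's career condition equals B's (B additionally checks ll truthy, which is implied)
theorem careercond_eq (l : String) :
    ((pv_career_keywords.any (fun k => PySem.Str.isIn k (PySem.Str.lower l))
      && !(pv_excluded.any (fun host => PySem.Str.isIn host (PySem.Str.lower l))))
      && !(pv_platform_hosts.any (fun host => PySem.Str.isIn host (PySem.Str.lower l))))
    = pvCareerMatch l := by
  simp only [pvCareerMatch]
  by_cases hs : PySem.Str.lower l = ""
  · rw [any_career_empty _ hs]
    simp
  · have hb : (PySem.Str.lower l == "") = false := beq_eq_false_iff_ne.mpr hs
    rw [hb]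
    simp

theorem plat_ne_empty (l : String) (h : pvPlatMatch l = true) : (l == "") = false := by
  by_contra hc
  have hl : l = "" := by simpa using hc
  subst hl
  exact absurd h (by decide)

theorem career_ne_empty (l : String) (h : pvCareerMatch l = true) : (l == "") = false := by
  by_contra hc
  have hl : l = "" := by simpa using hc
  subst hl
  exact absurd h (by decide)

theorem career_false_of_plat (l : String) (h : pvPlatMatch l = true) : pvCareerMatch l = false := by
  simp only [pvCareerMatch]
  simp only [pvPlatMatch] at h
  simp only [h]
  simp

-- once jobs_url is truthy it is final, and the careers search continues independently
theorem loopA_truthy (links : List String) (j c : Option String) (hj : pyFalsy j = false) :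
    categorizeLoopA links j c
      = (j, if pyFalsy c = true then Option.or (links.find? pvCareerMatch) c else c) := by
  induction links generalizing c with
  | nil => simp [categorizeLoopA]
  | cons h t ih =>
    simp only [categorizeLoopA]
    rw [hj]
    simp only [Bool.false_and, Bool.false_eq_true, if_false]
    by_cases hc : pyFalsy c = true
    · rw [hc]
      simp only [Bool.true_and]
      rw [careercond_eq h]
      by_cases hm : pvCareerMatch h = true
      · rw [if_pos hm, ih (some h), List.find?_cons_of_pos hm]
        simp [pyFalsy, career_ne_empty h hm]
      · rw [if_neg hm, ih c]
        rw [List.find?_cons_of_neg (by simpa using hm)]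
        simp [hc]
    · have hc' : pyFalsy c = false := by simpa using hc
      rw [hc']
      simp only [Bool.false_and, Bool.false_eq_true, if_false]
      rw [ih c]
      simp [hc']

theorem loopA_none (links : List String) (c : Option String) :
    categorizeLoopA links none c
      = (links.find? pvPlatMatch,
         if pyFalsy c = true then Option.or (links.find? pvCareerMatch) c else c) := by
  induction links generalizing c with
  | nil => simp [categorizeLoopA]
  | cons h t ih =>
    simp only [categorizeLoopA]
    have hplat : (pv_platform_hosts.any fun host => PySem.Str.isIn host (PySem.Str.lower h))
        = pvPlatMatch h := rfl
    rw [show pyFalsy none = true from rfl]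
    simp only [Bool.true_and]
    rw [hplat]
    by_cases hp : pvPlatMatch h = true
    · rw [if_pos hp, List.find?_cons_of_pos hp]
      rw [loopA_truthy t (some h) c (by simp [pyFalsy, plat_ne_empty h hp])]
      rw [List.find?_cons_of_neg (by simp [career_false_of_plat h hp])]
    · have hp' : pvPlatMatch h = false := by simpa using hp
      rw [hp', List.find?_cons_of_neg (by simp [hp'])]
      simp only [Bool.false_eq_true, if_false]
      by_cases hc : pyFalsy c = true
      · rw [hc]
        simp only [Bool.true_and]
        rw [show (((pv_career_keywords.any fun k => PySem.Str.isIn k (PySem.Str.lower h)) &&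
              !(pv_excluded.any fun host => PySem.Str.isIn host (PySem.Str.lower h))) &&
            !false) = pvCareerMatch h from by rw [← careercond_eq h, hplat, hp']]
        by_cases hm : pvCareerMatch h = true
        · rw [if_pos hm, ih (some h), List.find?_cons_of_pos hm]
          simp [pyFalsy, career_ne_empty h hm]
        · rw [if_neg hm, ih c, List.find?_cons_of_neg (by simpa using hm)]
          simp [hc]
      · have hc' : pyFalsy c = false := by simpa using hc
        rw [hc']
        simp only [Bool.false_and, Bool.false_eq_true, if_false]
        rw [ih c]
        simp [hc']

-- ===== VERDICT (by name: the statement is the Claim_ definition above) =====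
theorem categorize_links_py_spec : Claim_equal_categorize_links_py := by
  intro links _
  show categorize_links_py links = categorize_links_py_alt links
  rw [categorize_links_py, loopA_none links none]
  simp [categorize_links_py_alt, pyFalsy]
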